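-- pv_equiv track=rewrite | github.com/pypi-data/pypi-mirror-399 | packages/modelco/modelco-0.0.1.5.tar.gz/modelco-0.0.1.5/model_collaboration/method/text_llm_blender.py | _parse_pairwise_preference
-- ===== SOURCE A (Python) =====
-- def _parse_pairwise_preference(output_text: str) -> str:
--     """
--     Parse the ranker's pairwise preference output.
--     Returns "A", "B", or "" if no clear preference is found.
--     """
--     text = output_text.strip().upper()
--     for ch in text:
--         if ch == "A":
--             return "A"
--         if ch == "B":
--             return "B"
--     return ""
-- ===== SOURCE B (Python) =====
-- def _parse_pairwise_preference(output_text: str) -> str: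
--     """
--     Parse the ranker's pairwise preference output.
--     Returns "A", "B", or "" if no clear preference is found.
--     """
--     text = output_text.strip().upper()
--     i = text.find("A")
--     j = text.find("B")
--     if i == -1 and j == -1:
--         return ""
--     if j == -1:
--         return "A"
--     if i == -1:
--         return "B"
--     return "A" if i < j else "B"
-- ===== Notes on version B (the rewrite author's own statement) =====
-- stated objective: idiomatic
-- what changed: Replaces the explicit character-by-character scan loop with two str.find index lookups and a positional comparison of the resulting indices.
import Mathlib
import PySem

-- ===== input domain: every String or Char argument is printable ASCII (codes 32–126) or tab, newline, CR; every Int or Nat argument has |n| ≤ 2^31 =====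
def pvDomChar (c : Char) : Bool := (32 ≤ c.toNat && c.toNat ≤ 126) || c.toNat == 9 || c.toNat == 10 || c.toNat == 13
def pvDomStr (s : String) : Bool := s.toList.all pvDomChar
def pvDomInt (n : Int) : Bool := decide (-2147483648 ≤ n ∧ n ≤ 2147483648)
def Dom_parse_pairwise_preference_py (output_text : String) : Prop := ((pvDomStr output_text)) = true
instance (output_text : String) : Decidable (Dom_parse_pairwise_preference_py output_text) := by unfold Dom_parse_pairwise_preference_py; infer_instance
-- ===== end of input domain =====

-- B replaces A's explicit first-occurrence character scan with two str.find lookups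
-- and a positional comparison (idiomatic; intended constant-factor speedup from the library scan).

-- ===== PORT A =====
-- the 'for ch in text: …' loop with its early returns
def pvLoopA : List Char → String
  | [] => ""
  | ch :: rest => if ch = 'A' then "A" else if ch = 'B' then "B" else pvLoopA rest

def parse_pairwise_preference_py (output_text : String) : String :=
  let text := PySem.Str.upper (PySem.Str.strip output_text)
  pvLoopA text.toList

-- ===== PORT B =====
def parse_pairwise_preference_py_alt (output_text : String) : String :=
  let text := PySem.Str.upper (PySem.Str.strip output_text)
  let i := PySem.Str.find text "A"
  let j := PySem.Str.find text "B"
  if i = -1 ∧ j = -1 then ""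
  else if j = -1 then "A"
  else if i = -1 then "B"
  else if i < j then "A" else "B"

-- ===== PRECONDITION & SPEC =====
def Spec_parse_pairwise_preference_py (output_text : String) (out : String) : Prop := out = parse_pairwise_preference_py_alt output_text
instance (output_text : String) (out : String) : Decidable (Spec_parse_pairwise_preference_py output_text out) := by unfold Spec_parse_pairwise_preference_py; infer_instance

-- ===== CLAIM (what is proved, stated in full; the proofs are below) =====
def Claim_equal_parse_pairwise_preference_py : Prop := ∀ (output_text : String), Dom_parse_pairwise_preference_py output_text → Spec_parse_pairwise_preference_py output_text (parse_pairwise_preference_py output_text)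

-- ===== LEMMAS AND PROOFS =====

-- a singleton is a prefix iff it is the head
theorem pv_singleton_prefix (a : Char) (xs : List Char) : [a] <+: xs ↔ xs.head? = some a := by
  constructor
  · rintro ⟨t, rfl⟩; rfl
  · intro h
    cases xs with
    | nil => simp at h
    | cons b t => simp at h; subst h; exact ⟨t, rfl⟩

-- a singleton is infix iff the character occurs
theorem pv_singleton_infix (a : Char) (l : List Char) : [a] <:+: l ↔ a ∈ l := by
  constructor
  · intro h; exact h.subset (by simp)
  · intro h; obtain ⟨s, t, rfl⟩ := List.append_of_mem h; exact ⟨s, t, by simp⟩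

theorem pv_prefix_drop (a : Char) (l : List Char) (k : Nat) : [a] <+: l.drop k ↔ l[k]? = some a := by
  rw [pv_singleton_prefix, List.head?_drop]

-- if neither 'A' nor 'B' occurs, the scan returns ""
theorem pvLoopA_none (l : List Char) (hA : 'A' ∉ l) (hB : 'B' ∉ l) : pvLoopA l = "" := by
  induction l with
  | nil => rfl
  | cons c rest ih =>
    simp only [List.mem_cons, not_or] at hA hB
    rw [pvLoopA, if_neg (fun h => hA.1 h.symm), if_neg (fun h => hB.1 h.symm)]
    exact ih hA.2 hB.2

-- if position k holds c ∈ {'A','B'} and no earlier position holds 'A' or 'B',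
-- the scan returns the string of c
theorem pvLoopA_first (l : List Char) (k : Nat) (c : Char) (hc : c = 'A' ∨ c = 'B')
    (hk : l[k]? = some c)
    (hmin : ∀ i < k, l[i]? ≠ some 'A' ∧ l[i]? ≠ some 'B') :
    pvLoopA l = if c = 'A' then "A" else "B" := by
  induction l generalizing k with
  | nil => simp at hk
  | cons d rest ih =>
    cases k with
    | zero =>
      simp at hk; subst hk
      rcases hc with h | h <;> simp [pvLoopA, h]
    | succ k' =>
      have h0 := hmin 0 (Nat.succ_pos _)
      have hd : d ≠ 'A' ∧ d ≠ 'B' := by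
        constructor <;> intro h <;> subst h
        · exact h0.1 rfl
        · exact h0.2 rfl
      rw [pvLoopA, if_neg hd.1, if_neg hd.2]
      exact ih k' (by simpa using hk)
        (fun i hi => by simpa using hmin (i + 1) (Nat.succ_lt_succ hi))

-- the heart of the equivalence, stated over the character list
theorem pv_key (l : List Char) :
    pvLoopA l =
      (if PySem.Chars.find l ['A'] = -1 ∧ PySem.Chars.find l ['B'] = -1 then ""
       else if PySem.Chars.find l ['B'] = -1 then "A"
       else if PySem.Chars.find l ['A'] = -1 then "B"
       else if PySem.Chars.find l ['A'] < PySem.Chars.find l ['B'] then "A" else "B") := by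
  have hiLB : -1 ≤ PySem.Chars.find l ['A'] := PySem.Chars.neg_one_le_find l ['A']
  have hjLB : -1 ≤ PySem.Chars.find l ['B'] := PySem.Chars.neg_one_le_find l ['B']
  by_cases hiN : PySem.Chars.find l ['A'] = -1
  · by_cases hjN : PySem.Chars.find l ['B'] = -1
    · -- neither occurs
      have hAm : 'A' ∉ l := by
        have := (PySem.Chars.find_eq_neg_one_iff l ['A']).mp hiN
        simpa [pv_singleton_infix] using this
      have hBm : 'B' ∉ l := by
        have := (PySem.Chars.find_eq_neg_one_iff l ['B']).mp hjN
        simpa [pv_singleton_infix] using this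
      rw [if_pos ⟨hiN, hjN⟩]
      exact pvLoopA_none l hAm hBm
    · -- only 'B' occurs
      have hjpos : 0 ≤ PySem.Chars.find l ['B'] := by omega
      have hspec := PySem.Chars.find_spec (s := l) (sub := ['B']) hjpos
      have hAm : 'A' ∉ l := by
        have := (PySem.Chars.find_eq_neg_one_iff l ['A']).mp hiN
        simpa [pv_singleton_infix] using this
      rw [if_neg (fun h => hjN h.2), if_neg hjN, if_pos hiN]
      have := pvLoopA_first l (PySem.Chars.find l ['B']).toNat 'B' (Or.inr rfl)
        ((pv_prefix_drop _ _ _).mp hspec.1)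
        (fun idx hidx => ⟨fun h => hAm (by
            have hp := (pv_prefix_drop 'A' l idx).mpr h
            have : 'A' ∈ l.drop idx := hp.subset (by simp)
            exact List.mem_of_mem_drop this),
          fun h => hspec.2 idx hidx ((pv_prefix_drop _ _ _).mpr h)⟩)
      simpa using this
  · have hipos : 0 ≤ PySem.Chars.find l ['A'] := by omega
    have hispec := PySem.Chars.find_spec (s := l) (sub := ['A']) hipos
    by_cases hjN : PySem.Chars.find l ['B'] = -1
    · -- only 'A' occurs
      have hBm : 'B' ∉ l := by
        have := (PySem.Chars.find_eq_neg_one_iff l ['B']).mp hjN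
        simpa [pv_singleton_infix] using this
      rw [if_neg (fun h => hiN h.1), if_pos hjN]
      have := pvLoopA_first l (PySem.Chars.find l ['A']).toNat 'A' (Or.inl rfl)
        ((pv_prefix_drop _ _ _).mp hispec.1)
        (fun idx hidx => ⟨fun h => hispec.2 idx hidx ((pv_prefix_drop _ _ _).mpr h),
          fun h => hBm (by
            have hp := (pv_prefix_drop 'B' l idx).mpr h
            have : 'B' ∈ l.drop idx := hp.subset (by simp)
            exact List.mem_of_mem_drop this)⟩)
      simpa using this
    · -- both occur
      have hjpos : 0 ≤ PySem.Chars.find l ['B'] := by omega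
      have hjspec := PySem.Chars.find_spec (s := l) (sub := ['B']) hjpos
      have hiB : l[(PySem.Chars.find l ['A']).toNat]? = some 'A' := (pv_prefix_drop _ _ _).mp hispec.1
      have hjB : l[(PySem.Chars.find l ['B']).toNat]? = some 'B' := (pv_prefix_drop _ _ _).mp hjspec.1
      rw [if_neg (fun h => hiN h.1), if_neg hjN, if_neg hiN]
      by_cases hlt : PySem.Chars.find l ['A'] < PySem.Chars.find l ['B']
      · rw [if_pos hlt]
        have := pvLoopA_first l (PySem.Chars.find l ['A']).toNat 'A' (Or.inl rfl) hiB
          (fun idx hidx => ⟨fun h => hispec.2 idx hidx ((pv_prefix_drop _ _ _).mpr h),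
            fun h => hjspec.2 idx (by omega) ((pv_prefix_drop _ _ _).mpr h)⟩)
        simpa using this
      · rw [if_neg hlt]
        have hne : PySem.Chars.find l ['A'] ≠ PySem.Chars.find l ['B'] := by
          intro h; rw [h] at hiB; rw [hiB] at hjB; simp at hjB
        have hgtN : (PySem.Chars.find l ['B']).toNat < (PySem.Chars.find l ['A']).toNat := by omega
        have := pvLoopA_first l (PySem.Chars.find l ['B']).toNat 'B' (Or.inr rfl) hjB
          (fun idx hidx => ⟨fun h => hispec.2 idx (by omega) ((pv_prefix_drop _ _ _).mpr h),
            fun h => hjspec.2 idx hidx ((pv_prefix_drop _ _ _).mpr h)⟩)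
        simpa using this

-- ===== VERDICT (by name: the statement is the Claim_ definition above) =====
theorem parse_pairwise_preference_py_spec : Claim_equal_parse_pairwise_preference_py := by
  intro output_text _
  unfold Spec_parse_pairwise_preference_py parse_pairwise_preference_py parse_pairwise_preference_py_alt
  simp only [PySem.Str.find_eq]
  exact pv_key (PySem.Str.upper (PySem.Str.strip output_text)).toList
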